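-- pv_equiv track=rewrite | github.com/SakshiI10/Python-DSA | 5_Strings/45_Wrong_Ball.py | countWrongPlacedBalls
-- ===== SOURCE A (Python) =====
-- def countWrongPlacedBalls(s):
--     count = 0
--
--     for i in range(len(s)):
--         index = i + 1
--         if index % 2 == 0 and s[i] == 'R':
--             count += 1
--         elif index % 2 != 0 and s[i] == 'B':
--             count += 1
--     return count
-- ===== SOURCE B (Python) =====
-- def countWrongPlacedBalls(s):
--     return s[1::2].count('R') + s[0::2].count('B')
-- ===== Notes on version B (the rewrite author's own statement) =====
-- stated objective: idiomatic
-- what changed: Replaces the indexed loop with a per-character parity branch by two strided slices (even/odd positions) counted with str.count.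
import Mathlib
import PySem

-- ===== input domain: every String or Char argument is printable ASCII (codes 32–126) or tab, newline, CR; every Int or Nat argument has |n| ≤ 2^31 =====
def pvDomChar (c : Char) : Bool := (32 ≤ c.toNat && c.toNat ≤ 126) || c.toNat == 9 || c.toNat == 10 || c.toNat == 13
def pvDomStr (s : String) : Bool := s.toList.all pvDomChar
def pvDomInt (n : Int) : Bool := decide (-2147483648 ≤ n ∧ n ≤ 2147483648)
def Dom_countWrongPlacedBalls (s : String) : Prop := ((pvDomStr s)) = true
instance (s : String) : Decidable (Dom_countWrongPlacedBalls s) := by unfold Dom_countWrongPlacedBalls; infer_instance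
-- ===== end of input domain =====

-- B replaces A's indexed loop with a per-character parity branch by two strided slices counted with str.count (idiomatic).

-- ===== PORT A =====
-- for i in range(len(s)): index = i + 1; branch on index % 2 and s[i]
def countWrongPlacedBalls (s : String) : Int :=
  (PySem.List.pyRange 0 (PySem.Str.len s : Int) 1).foldl
    (fun count i =>
      let index := i + 1
      if PySem.Int.mod index 2 = 0 ∧ PySem.Str.pyGet? s i = some 'R' then count + 1
      else if PySem.Int.mod index 2 ≠ 0 ∧ PySem.Str.pyGet? s i = some 'B' then count + 1
      else count) 0

-- ===== PORT B =====
-- s[1::2].count('R') + s[0::2].count('B'); step 2 ≠ 0, so both slices always exist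
def countWrongPlacedBalls_alt (s : String) : Int :=
  match PySem.Str.slice? s (some 1) none 2, PySem.Str.slice? s (some 0) none 2 with
  | some odd, some ev => (PySem.Str.count odd "R" : Int) + (PySem.Str.count ev "B" : Int)
  | _, _ => 0

-- ===== PRECONDITION & SPEC =====
def Spec_countWrongPlacedBalls (s : String) (out : Int) : Prop := out = countWrongPlacedBalls_alt s
instance (s : String) (out : Int) : Decidable (Spec_countWrongPlacedBalls s out) := by unfold Spec_countWrongPlacedBalls; infer_instance

-- ===== CLAIM (what is proved, stated in full; the proofs are below) =====
def Claim_equal_countWrongPlacedBalls : Prop := ∀ (s : String), Dom_countWrongPlacedBalls s → Spec_countWrongPlacedBalls s (countWrongPlacedBalls s)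

-- ===== LEMMAS AND PROOFS =====

-- every second element, starting with the first
def every2 : List Char → List Char
  | [] => []
  | [a] => [a]
  | a :: _ :: rest => a :: every2 rest

theorem every2_cons (c : Char) (t : List Char) : every2 (c :: t) = c :: every2 t.tail := by
  cases t <;> rfl

-- parity-tracking count of wrong balls: b = current 0-based position is even
def wcount : Bool → List Char → Int
  | _, [] => 0
  | b, c :: t => (if c = (if b then 'B' else 'R') then 1 else 0) + wcount (!b) t

theorem filterMap_range_every2 : ∀ (l : List Char),
    (List.range ((l.length + 1) / 2)).filterMap (fun k => l[2 * k]?) = every2 l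
  | [] => by simp [every2]
  | [a] => by simp [every2]
  | a :: b :: rest => by
      have ih := filterMap_range_every2 rest
      have hlen : (a :: b :: rest).length + 1 = (rest.length + 1) + 2 := by simp
      rw [every2, hlen]
      have h2 : ((rest.length + 1) + 2) / 2 = (rest.length + 1) / 2 + 1 := by omega
      rw [h2, List.range_succ_eq_map, List.filterMap_cons, List.filterMap_map]
      simp only [Nat.mul_zero, List.getElem?_cons_zero]
      rw [← ih]
      congr 1

theorem slice0_eq (l : List Char) :
    PySem.List.slice? l (some 0) none 2 = some (every2 l) := by
  rw [← filterMap_range_every2, PySem.List.slice?]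
  simp only [PySem.List.sliceIndices]
  norm_num
  have hc : (if 0 < l.length then (((l.length : Int) + 2 - 1) / 2).toNat else 0) = (l.length + 1) / 2 := by
    rcases Nat.eq_zero_or_pos l.length with h | h
    · simp [h]
    · rw [if_pos h]; omega
  rw [hc]
  apply List.filterMap_congr
  intro x _
  have hx : ((2 * (x : Int))).toNat = 2 * x := by omega
  rw [hx]

theorem slice1_eq (l : List Char) :
    PySem.List.slice? l (some 1) none 2 = some (every2 l.tail) := by
  rw [← filterMap_range_every2, PySem.List.slice?]
  simp only [PySem.List.sliceIndices]
  norm_num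
  cases l with
  | nil => simp
  | cons a t =>
      have hc : (if 1 < (a :: t).length then ((((a :: t).length : Int) - min 1 ((a :: t).length : Int) + 2 - 1) / 2).toNat else 0)
          = ((a :: t).length - 1 + 1) / 2 := by
        rcases lt_or_ge 1 (a :: t).length with h | h
        · rw [if_pos h]
          simp only [List.length_cons] at *
          omega
        · rw [if_neg (not_lt.mpr h)]
          simp only [List.length_cons] at *
          omega
      rw [hc]
      apply List.filterMap_congr
      intro x _
      have hx : (min 1 (((a :: t).length : Int)) + 2 * (x : Int)).toNat = 2 * x + 1 := by
        simp only [List.length_cons]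
        omega
      rw [hx]

theorem count_go (c : Char) : ∀ (l : List Char) (acc : Nat),
    PySem.Chars.count.go [c] l.length l acc = acc + l.count c := by
  intro l
  induction l with
  | nil => intro acc; simp [PySem.Chars.count.go]
  | cons h t ih =>
      intro acc
      rw [List.length_cons, PySem.Chars.count.go]
      by_cases hc : h = c
      · simp [hc, List.isPrefixOf, ih]
        omega
      · simp [List.isPrefixOf, Ne.symm hc, hc, ih]

theorem count_single (l : List Char) (c : Char) : PySem.Chars.count l [c] = l.count c := by
  rw [PySem.Chars.count]
  simp [count_go]

theorem wcount_eq (l : List Char) :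
    wcount true l = ((every2 l).count 'B' : Int) + ((every2 l.tail).count 'R' : Int) ∧
    wcount false l = ((every2 l).count 'R' : Int) + ((every2 l.tail).count 'B' : Int) := by
  induction l with
  | nil => simp [wcount, every2]
  | cons c t ih =>
      constructor <;>
      · rw [wcount, every2_cons]
        simp only [List.tail_cons, List.count_cons]
        by_cases h : c = 'B' <;> by_cases h2 : c = 'R' <;>
          simp only [h, h2, if_pos, beq_iff_eq, Bool.not_true, Bool.not_false] <;>
          push_cast <;> simp_all <;> ring

theorem afold_eq (l : List Char) : ∀ (fuel j : Nat), l.length - j ≤ fuel → j ≤ l.length → ∀ (acc : Int),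
    (PySem.List.pyRange (j : Int) (l.length : Int) 1).foldl
      (fun count i =>
        let index := i + 1
        if PySem.Int.mod index 2 = 0 ∧ PySem.List.pyGet? l i = some 'R' then count + 1
        else if PySem.Int.mod index 2 ≠ 0 ∧ PySem.List.pyGet? l i = some 'B' then count + 1
        else count) acc
    = acc + wcount (decide (j % 2 = 0)) (l.drop j) := by
  intro fuel
  induction fuel with
  | zero =>
      intro j hf hj acc
      have hjl : j = l.length := by omega
      subst hjl
      rw [PySem.List.pyRange_one_eq_nil (by omega)]
      simp [wcount]
  | succ m ih =>
      intro j hf hj acc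
      rcases Nat.eq_or_lt_of_le hj with he | hlt
      · subst he
        rw [PySem.List.pyRange_one_eq_nil (by omega)]
        simp [wcount]
      · rw [PySem.List.pyRange_one_cons (by exact_mod_cast hlt), List.foldl_cons]
        have hcast : ((j : Int) + 1) = ((j + 1 : Nat) : Int) := by push_cast; ring
        rw [hcast, ih (j + 1) (by omega) (by omega)]
        have hget : PySem.List.pyGet? l ((j : Int)) = some l[j] := by
          rw [PySem.List.pyGet?_natCast]
          exact List.getElem?_eq_getElem hlt
        have hmod : PySem.Int.mod ((j + 1 : Nat) : Int) 2 = (((j + 1) % 2 : Nat) : Int) := by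
          simp [PySem.Int.mod, Int.fmod_eq_emod]
        have hdrop : l.drop j = l[j] :: l.drop (j + 1) := by
          exact (List.getElem_cons_drop hlt).symm
        rw [hdrop]
        simp only [hget, hmod, wcount]
        by_cases hpar : j % 2 = 0
        · have h1 : ((j + 1) % 2 : Nat) = 1 := by omega
          have hb : (!decide (j % 2 = 0)) = decide ((j + 1) % 2 = 0) := by simp [hpar]; omega
          rw [← hb]
          simp only [h1, hpar]
          by_cases hB : l[j] = 'B' <;> simp [hB]
          ring
        · have h1 : ((j + 1) % 2 : Nat) = 0 := by omega
          have hb : (!decide (j % 2 = 0)) = decide ((j + 1) % 2 = 0) := by simp [hpar]; omega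
          rw [← hb]
          simp only [h1, hpar]
          by_cases hR : l[j] = 'R' <;> simp [hR]
          ring

-- ===== VERDICT (by name: the statement is the Claim_ definition above) =====
theorem countWrongPlacedBalls_spec : Claim_equal_countWrongPlacedBalls := by
  intro s _
  unfold Spec_countWrongPlacedBalls countWrongPlacedBalls countWrongPlacedBalls_alt
  have hA :
      (PySem.List.pyRange 0 (PySem.Str.len s : Int) 1).foldl
        (fun count i =>
          let index := i + 1
          if PySem.Int.mod index 2 = 0 ∧ PySem.Str.pyGet? s i = some 'R' then count + 1
          else if PySem.Int.mod index 2 ≠ 0 ∧ PySem.Str.pyGet? s i = some 'B' then count + 1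
          else count) 0
      = wcount true s.toList := by
    have h0 := afold_eq s.toList s.toList.length 0 (by omega) (by omega) 0
    simp only [Nat.cast_zero, List.drop_zero, Nat.zero_mod, decide_true, zero_add] at h0
    simp only [PySem.Str.len, PySem.Str.pyGet?, PySem.Chars.pyGet?_eq_listPyGet?]
    exact h0
  rw [hA]
  have h1 : PySem.Str.slice? s (some 1) none 2 = some (String.ofList (every2 s.toList.tail)) := by
    rw [PySem.Str.slice?]
    simp only [PySem.Chars.slice?_eq_listSlice?, slice1_eq, Option.map_some]
  have h0 : PySem.Str.slice? s (some 0) none 2 = some (String.ofList (every2 s.toList)) := by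
    rw [PySem.Str.slice?]
    simp only [PySem.Chars.slice?_eq_listSlice?, slice0_eq, Option.map_some]
  rw [h1, h0]
  simp only [PySem.Str.count]
  have hR : (String.ofList (every2 s.toList.tail)).toList = every2 s.toList.tail := by simp
  have hB : (String.ofList (every2 s.toList)).toList = every2 s.toList := by simp
  rw [hR, hB]
  have hsub : ("R" : String).toList = ['R'] ∧ ("B" : String).toList = ['B'] := by decide
  rw [hsub.1, hsub.2, count_single, count_single, (wcount_eq s.toList).1]
  ring
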